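-- pv_equiv track=rewrite | github.com/kayoung-dev/problem-solving | generator/level01/g060.py | solve_internal
-- ===== SOURCE A (Python) =====
-- def solve_internal(n, m, ids):
--     lines = [[] for _ in range(m)]
--     for item_id in ids:
--         lines[item_id % m].append(str(item_id))
--
--     output = []
--     for i in range(m):
--         if not lines[i]:
--             output.append(f"Line {i}: Empty")
--         else:
--             output.append(f"Line {i}: {' '.join(lines[i])}")
--     return "\n".join(output)
-- ===== SOURCE B (Python) =====
-- def solve_internal(n, m, ids):
--     def line(i):
--         matching = [str(x) for x in ids if x % m == i]
--         return f"Line {i}: {' '.join(matching)}" if matching else f"Line {i}: Empty"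
--     return "\n".join(line(i) for i in range(m))
-- ===== Notes on version B (the rewrite author's own statement) =====
-- stated objective: simpler
-- what changed: B drops the pre-allocated bucket lists and the distribution pass: for each line i it rescans ids with a comprehension [str(x) for x in ids if x % m == i] and formats the line directly (O(n*m) rescan instead of O(n+m) bucketing).
import Mathlib
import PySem

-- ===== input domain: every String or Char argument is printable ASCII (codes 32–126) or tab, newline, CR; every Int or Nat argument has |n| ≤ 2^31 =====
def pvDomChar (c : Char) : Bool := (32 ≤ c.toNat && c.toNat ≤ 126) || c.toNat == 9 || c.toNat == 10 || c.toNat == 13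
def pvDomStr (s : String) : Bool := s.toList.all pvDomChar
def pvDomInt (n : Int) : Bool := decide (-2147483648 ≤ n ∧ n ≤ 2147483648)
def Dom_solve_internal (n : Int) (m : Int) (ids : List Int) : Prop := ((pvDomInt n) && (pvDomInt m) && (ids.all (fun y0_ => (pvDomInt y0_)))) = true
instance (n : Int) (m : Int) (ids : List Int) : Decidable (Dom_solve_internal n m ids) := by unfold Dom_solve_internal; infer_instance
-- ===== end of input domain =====

-- B replaces the bucket-distribution pass by a per-line rescan of ids (simpler, O(n*m));
-- equivalence proved for m > 0 or ids = [] (A raises on the other inputs).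


-- ===== PORT A =====
-- lines[item_id % m].append(str(item_id))  (index is in range under Pre_, so pySetD/pyGetD are exact)
def pvAppendAt (ls : List (List String)) (i : Int) (v : String) : List (List String) :=
  PySem.List.pySetD ls i (PySem.List.pyGetD ls i [] ++ [v])

def solve_internal (n : Int) (m : Int) (ids : List Int) : String :=
  let lines0 : List (List String) := (PySem.List.pyRange 0 m 1).map (fun _ => [])
  let lines := ids.foldl (fun ls x => pvAppendAt ls (PySem.Int.mod x m) (PySem.Int.toStr x)) lines0
  let output := (PySem.List.pyRange 0 m 1).foldl (fun out i =>
    if PySem.List.pyGetD lines i [] = [] then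
      out ++ ["Line " ++ PySem.Int.toStr i ++ ": Empty"]
    else
      out ++ ["Line " ++ PySem.Int.toStr i ++ ": " ++ PySem.Str.join " " (PySem.List.pyGetD lines i [])]) []
  PySem.Str.join "\n" output

-- ===== PORT B =====
def pvLine (m : Int) (ids : List Int) (i : Int) : String :=
  let matching := (ids.filter (fun x => PySem.Int.mod x m == i)).map PySem.Int.toStr
  if matching = [] then "Line " ++ PySem.Int.toStr i ++ ": Empty"
  else "Line " ++ PySem.Int.toStr i ++ ": " ++ PySem.Str.join " " matching

def solve_internal_alt (n : Int) (m : Int) (ids : List Int) : String :=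
  PySem.Str.join "\n" ((PySem.List.pyRange 0 m 1).map (pvLine m ids))

-- ===== PRECONDITION & SPEC =====
-- Pre_ excludes exactly the inputs where A raises: m ≤ 0 with a non-empty ids
-- (ZeroDivisionError for m = 0, IndexError for m < 0).
def Pre_solve_internal (n : Int) (m : Int) (ids : List Int) : Prop := 0 < m ∨ ids = []
instance (n : Int) (m : Int) (ids : List Int) : Decidable (Pre_solve_internal n m ids) := by unfold Pre_solve_internal; infer_instance
def pvWitness_solve_internal : Int × Int × List Int := (3, 2, [1, 2, 3, -4])

def Spec_solve_internal (n : Int) (m : Int) (ids : List Int) (out : String) : Prop := out = solve_internal_alt n m ids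
instance (n : Int) (m : Int) (ids : List Int) (out : String) : Decidable (Spec_solve_internal n m ids out) := by unfold Spec_solve_internal; infer_instance

-- ===== CLAIM (what is proved, stated in full; the proofs are below) =====
def Claim_equal_solve_internal : Prop := ∀ (n : Int) (m : Int) (ids : List Int), Dom_solve_internal n m ids → Pre_solve_internal n m ids → Spec_solve_internal n m ids (solve_internal n m ids)

-- ===== LEMMAS AND PROOFS =====

-- the distribution loop preserves the number of buckets
lemma foldl_ite_append {A B : Type} (p : A → Prop) [DecidablePred p] (f g : A → B)
    (l : List A) (acc : List B) :
    l.foldl (fun out x => if p x then out ++ [f x] else out ++ [g x]) acc =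
      acc ++ l.map (fun x => if p x then f x else g x) := by
  induction l generalizing acc with
  | nil => simp
  | cons x xs ih =>
      simp only [List.foldl_cons, List.map_cons]
      rw [ih]
      split <;> simp

-- bucket j of the distribution loop = the rescan filter of B
lemma bucket_eq (m : Int) (hm : 0 < m) (ids : List Int) :
    ∀ (ls : List (List String)), ls.length = m.toNat → ∀ j : Nat, j < m.toNat →
    (ids.foldl (fun ls x => pvAppendAt ls (PySem.Int.mod x m) (PySem.Int.toStr x)) ls).getD j [] =
      ls.getD j [] ++ (ids.filter (fun x => PySem.Int.mod x m == (j : Int))).map PySem.Int.toStr := by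
  induction ids with
  | nil => intro ls _ j _; simp
  | cons x xs ih =>
      intro ls hlen j hj
      have h0 : 0 ≤ PySem.Int.mod x m := PySem.Int.mod_nonneg x hm
      have hlt : PySem.Int.mod x m < m := PySem.Int.mod_lt x hm
      have hkN : (PySem.Int.mod x m).toNat < ls.length := by
        rw [hlen]; omega
      have hstep : pvAppendAt ls (PySem.Int.mod x m) (PySem.Int.toStr x) =
          ls.set (PySem.Int.mod x m).toNat
            (ls.getD (PySem.Int.mod x m).toNat [] ++ [PySem.Int.toStr x]) := by
        rw [pvAppendAt, PySem.List.pySetD_of_nonneg _ _ h0, PySem.List.pyGetD_of_nonneg _ _ h0]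
      simp only [List.foldl_cons, hstep]
      rw [ih _ (by rw [List.length_set, hlen]) j hj]
      by_cases heq : (PySem.Int.mod x m).toNat = j
      · have hbeq : (PySem.Int.mod x m == (j : Int)) = true := by
          simp [← heq, Int.toNat_of_nonneg h0]
        subst heq
        simp only [List.filter_cons, hbeq, if_true]
        rw [List.getD_eq_getElem?_getD, List.getElem?_set_self (h := hkN)]
        simp [List.getD_eq_getElem?_getD]
      · have hbeq : (PySem.Int.mod x m == (j : Int)) = false := by
          simp only [beq_eq_false_iff_ne, ne_eq]
          intro hc; apply heq; rw [hc]; simp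
        simp only [List.filter_cons, hbeq, Bool.false_eq_true, if_false]
        rw [List.getD_eq_getElem?_getD, List.getElem?_set_ne (h := heq), ← List.getD_eq_getElem?_getD]

-- ===== VERDICT (by name: the statement is the Claim_ definition above) =====
theorem solve_internal_spec : Claim_equal_solve_internal := by
  intro n m ids _ hpre
  unfold Spec_solve_internal solve_internal solve_internal_alt
  dsimp only
  by_cases hm : m ≤ 0
  · -- m ≤ 0, so ids = [] by Pre_ and the range is empty: both sides join an empty list
    rcases hpre with hpos | hnil
    · omega
    · subst hnil
      rw [PySem.List.pyRange_one_eq_nil (by omega)]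
      rfl
  · -- m > 0: line by line
    have hm : 0 < m := by omega
    rw [foldl_ite_append, List.nil_append]
    congr 1
    apply List.map_congr_left
    intro i hi
    have hib := (PySem.List.mem_pyRange_one).1 hi
    have h0i : 0 ≤ i := hib.1
    have him : i < m := hib.2
    have hlen : ((PySem.List.pyRange 0 m 1).map (fun _ => ([] : List String))).length = m.toNat := by
      simp [PySem.List.length_pyRange_one]
    have hjlt : i.toNat < m.toNat := by omega
    have hbucket := bucket_eq m hm ids _ hlen i.toNat hjlt
    have hinit : ((PySem.List.pyRange 0 m 1).map (fun _ => ([] : List String))).getD i.toNat [] = [] := by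
      rw [List.getD_eq_getElem?_getD, List.getElem?_map]
      cases h : (PySem.List.pyRange 0 m 1)[i.toNat]? <;> simp
    have hcast : ((i.toNat : Int)) = i := Int.toNat_of_nonneg h0i
    have hget : PySem.List.pyGetD
        (ids.foldl (fun ls x => pvAppendAt ls (PySem.Int.mod x m) (PySem.Int.toStr x))
          ((PySem.List.pyRange 0 m 1).map fun _ => [])) i [] =
        (ids.filter (fun x => PySem.Int.mod x m == i)).map PySem.Int.toStr := by
      rw [PySem.List.pyGetD_of_nonneg _ _ h0i, hbucket, hinit, List.nil_append]
      congr 1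
      apply List.filter_congr
      intro x _
      rw [hcast]
    rw [pvLine, hget]
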